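-- pv_equiv track=rewrite | github.com/fernaper/CodeWars | 3kyu/TheMillionFibonnacciKata.py | calc
-- ===== SOURCE A (Python) =====
-- def calc(num):
--     if num == 0:
--         return (0, 1)
--     elif num == 1:
--         return (1, 1)
--     else:
--         first, second = calc(num // 2)
--         p = first * (2 * second - first)
--         q = second * second + first * first
--         return (p, q) if num % 2 == 0 else (q, p + q)
-- ===== SOURCE B (Python) =====
-- def calc(num):
--     # Matrix exponentiation: Q^num = [[F(num+1), F(num)], [F(num), F(num-1)]];
--     # exponentiation by squaring over the bits of num, returning (F(num), F(num+1)).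
--     a, b, c, d = 1, 0, 0, 1          # accumulator R = identity
--     e, f, g, h = 1, 1, 1, 0          # base Q
--     n = num
--     while n > 0:
--         if n & 1:
--             a, b, c, d = a * e + b * g, a * f + b * h, c * e + d * g, c * f + d * h
--         e, f, g, h = e * e + f * g, e * f + f * h, g * e + h * g, g * f + h * h
--         n >>= 1
--     return (b, a)
-- ===== Notes on version B (the rewrite author's own statement) =====
-- stated objective: alternative
-- what changed: Replaces the top-down fast-doubling recursion by a bottom-up 2x2 matrix exponentiation-by-squaring loop over the bits of num.
import Mathlib
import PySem

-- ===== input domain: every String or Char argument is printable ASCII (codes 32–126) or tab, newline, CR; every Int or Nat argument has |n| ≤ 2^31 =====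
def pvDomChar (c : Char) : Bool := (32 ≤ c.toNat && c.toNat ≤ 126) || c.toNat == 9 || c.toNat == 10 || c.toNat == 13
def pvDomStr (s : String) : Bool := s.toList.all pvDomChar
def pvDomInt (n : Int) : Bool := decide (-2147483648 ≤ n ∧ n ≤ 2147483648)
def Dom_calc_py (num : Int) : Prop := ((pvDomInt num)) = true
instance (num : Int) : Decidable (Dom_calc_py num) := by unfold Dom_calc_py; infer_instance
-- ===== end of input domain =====

-- B replaces A's top-down fast-doubling recursion by a bottom-up 2x2 matrix
-- exponentiation-by-squaring loop over the bits of num (alternative algorithm, same cost).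


-- ===== PORT A =====
-- literal transliteration of A's fast-doubling recursion; on num < 0 the Python
-- recursion never terminates (excluded by Pre_), so that branch returns a junk value
def calc_py (num : Int) : Int × Int :=
  if num = 0 then (0, 1)
  else if num = 1 then (1, 1)
  else if _h : 1 < num then
    let r := calc_py (PySem.Int.floordiv num 2)
    let first := r.1
    let second := r.2
    let p := first * (2 * second - first)
    let q := second * second + first * first
    if PySem.Int.mod num 2 = 0 then (p, q) else (q, p + q)
  else (0, 0)
termination_by num.toNat
decreasing_by
  have := Int.fdiv_eq_ediv_of_nonneg (a := num) (b := 2) (by omega)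
  simp [PySem.Int.floordiv]
  omega

-- ===== PORT B =====
-- the while-loop of Source B: state (accumulator matrix, base matrix), n halved each step
def calcLoop (n : Int) (a b c d e f g h : Int) : Int × Int :=
  if _hn : 0 < n then
    let (a', b', c', d') :=
      if PySem.Int.band n 1 ≠ 0 then
        (a * e + b * g, a * f + b * h, c * e + d * g, c * f + d * h)
      else (a, b, c, d)
    calcLoop (Int.fdiv n 2) a' b' c' d'
      (e * e + f * g) (e * f + f * h) (g * e + h * g) (g * f + h * h)
  else (b, a)
termination_by n.toNat
decreasing_by
  have := Int.fdiv_eq_ediv_of_nonneg (a := n) (b := 2) (by omega)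
  omega

def calc_py_alt (num : Int) : Int × Int :=
  calcLoop num 1 0 0 1 1 1 1 0

-- ===== PRECONDITION & SPEC =====
-- A recurses forever (RecursionError) on negative num, so those inputs are excluded
def Pre_calc_py (num : Int) : Prop := 0 ≤ num
instance (num : Int) : Decidable (Pre_calc_py num) := by unfold Pre_calc_py; infer_instance
def pvWitness_calc_py : Int := (10)

def Spec_calc_py (num : Int) (out : Int × Int) : Prop := out = calc_py_alt num
instance (num : Int) (out : Int × Int) : Decidable (Spec_calc_py num out) := by unfold Spec_calc_py; infer_instance

-- ===== CLAIM (what is proved, stated in full; the proofs are below) =====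
def Claim_equal_calc_py : Prop := ∀ (num : Int), Dom_calc_py num → Pre_calc_py num → Spec_calc_py num (calc_py num)

-- ===== LEMMAS AND PROOFS =====

-- fib as an Int-valued function
def fibZ (n : Nat) : Int := (Nat.fib n : Int)

theorem fibZ_add_two (n : Nat) : fibZ (n + 2) = fibZ n + fibZ (n + 1) := by
  simp only [fibZ, Nat.fib_add_two]; push_cast; ring

theorem fibZ_two_mul (m : Nat) : fibZ (2 * m) = fibZ m * (2 * fibZ (m + 1) - fibZ m) := by
  have h : Nat.fib m ≤ 2 * Nat.fib (m + 1) := le_trans Nat.fib_le_fib_succ (by omega)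
  simp only [fibZ, Nat.fib_two_mul]
  push_cast [h]; ring

theorem fibZ_two_mul_add_one (m : Nat) :
    fibZ (2 * m + 1) = fibZ (m + 1) * fibZ (m + 1) + fibZ m * fibZ m := by
  simp only [fibZ, Nat.fib_two_mul_add_one]
  push_cast; ring

theorem floordiv_natCast_two (n : Nat) :
    PySem.Int.floordiv (n : Int) 2 = ((n / 2 : Nat) : Int) := by
  exact_mod_cast PySem.Int.floordiv_natCast n 2

theorem mod_natCast_two (n : Nat) :
    PySem.Int.mod (n : Int) 2 = ((n % 2 : Nat) : Int) := by
  exact_mod_cast PySem.Int.mod_natCast n 2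

-- A computes the Fibonacci pair (fast-doubling correctness)
theorem calc_py_fib (n : Nat) : calc_py (n : Int) = (fibZ n, fibZ (n + 1)) := by
  induction n using Nat.strong_induction_on with
  | _ n ih =>
    rw [calc_py]
    by_cases h0 : n = 0
    · subst h0; norm_num [fibZ]
    by_cases h1 : n = 1
    · subst h1; norm_num [fibZ]
    have hn2 : 2 ≤ n := by omega
    rw [if_neg (by exact_mod_cast h0), if_neg (by exact_mod_cast h1),
        dif_pos (by exact_mod_cast hn2), floordiv_natCast_two,
        ih (n / 2) (by omega), mod_natCast_two]
    rcases Nat.mod_two_eq_zero_or_one n with he | ho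
    · have h2 : n = 2 * (n / 2) := by omega
      rw [he, if_pos (by norm_num)]
      conv_rhs => rw [h2]
      rw [fibZ_two_mul, fibZ_two_mul_add_one]
    · have h2 : n = 2 * (n / 2) + 1 := by omega
      rw [ho, if_neg (by norm_num)]
      conv_rhs => rw [h2]
      rw [Prod.mk.injEq]
      refine ⟨by rw [fibZ_two_mul_add_one], ?_⟩
      rw [show 2 * (n / 2) + 1 + 1 = 2 * (n / 2) + 2 by omega,
          fibZ_add_two, fibZ_two_mul, fibZ_two_mul_add_one]

-- 2x2 integer matrices for the B-side proof
structure Mat2 where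
  a : Int
  b : Int
  c : Int
  d : Int
deriving DecidableEq, Repr

def mmul (x y : Mat2) : Mat2 :=
  ⟨x.a * y.a + x.b * y.c, x.a * y.b + x.b * y.d,
   x.c * y.a + x.d * y.c, x.c * y.b + x.d * y.d⟩

def mone : Mat2 := ⟨1, 0, 0, 1⟩

def mpow (q : Mat2) : Nat → Mat2
  | 0 => mone
  | k + 1 => mmul q (mpow q k)

theorem mmul_assoc (x y z : Mat2) : mmul (mmul x y) z = mmul x (mmul y z) := by
  cases x; cases y; cases z
  simp only [mmul, Mat2.mk.injEq]
  exact ⟨by ring, by ring, by ring, by ring⟩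

theorem mmul_mone (x : Mat2) : mmul x mone = x := by
  cases x; simp [mmul, mone]

theorem mone_mmul (x : Mat2) : mmul mone x = x := by
  cases x; simp [mmul, mone]

theorem mpow_sq (q : Mat2) (k : Nat) : mpow (mmul q q) k = mpow q (2 * k) := by
  induction k with
  | zero => rfl
  | succ k ihk =>
    rw [show 2 * (k + 1) = (2 * k) + 1 + 1 by omega]
    show mmul (mmul q q) (mpow (mmul q q) k) = mmul q (mmul q (mpow q (2 * k)))
    rw [ihk, mmul_assoc]

-- loop invariant: calcLoop returns the b- and a-entries of R · Q^n
theorem calcLoop_spec (n : Nat) (R Q : Mat2) :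
    calcLoop (n : Int) R.a R.b R.c R.d Q.a Q.b Q.c Q.d =
      ((mmul R (mpow Q n)).b, (mmul R (mpow Q n)).a) := by
  induction n using Nat.strong_induction_on generalizing R Q with
  | _ n ih =>
    rw [calcLoop]
    by_cases h0 : n = 0
    · subst h0
      rw [dif_neg (by norm_num)]
      simp [mpow, mmul_mone]
    · have hpos : (0:Int) < (n : Int) := by exact_mod_cast Nat.pos_of_ne_zero h0
      have hband : PySem.Int.band (n : Int) 1 = ((n % 2 : Nat) : Int) := by
        rw [PySem.Int.band_one, mod_natCast_two]
      have hfd : Int.fdiv (n : Int) 2 = ((n / 2 : Nat) : Int) := by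
        rw [Int.fdiv_eq_ediv]; simp
      rw [dif_pos hpos, hband, hfd]
      rcases Nat.mod_two_eq_zero_or_one n with he | ho
      · have h2 : n = 2 * (n / 2) := by omega
        rw [he, if_neg (by norm_num)]
        show calcLoop ((n / 2 : Nat) : Int) R.a R.b R.c R.d
            (mmul Q Q).a (mmul Q Q).b (mmul Q Q).c (mmul Q Q).d = _
        rw [ih (n / 2) (by omega), mpow_sq, ← h2]
      · have h2 : n = 2 * (n / 2) + 1 := by omega
        rw [ho, if_pos (by norm_num)]
        show calcLoop ((n / 2 : Nat) : Int)
            (mmul R Q).a (mmul R Q).b (mmul R Q).c (mmul R Q).d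
            (mmul Q Q).a (mmul Q Q).b (mmul Q Q).c (mmul Q Q).d = _
        rw [ih (n / 2) (by omega), mpow_sq, mmul_assoc]
        rw [show mmul Q (mpow Q (2 * (n / 2))) = mpow Q (2 * (n / 2) + 1) from rfl, ← h2]

def qmat : Mat2 := ⟨1, 1, 1, 0⟩

theorem mpow_qmat (n : Nat) :
    mpow qmat n = ⟨fibZ (n + 1), fibZ n, fibZ n, fibZ (n + 1) - fibZ n⟩ := by
  induction n with
  | zero => simp [mpow, mone, fibZ]
  | succ n ihn =>
    show mmul qmat (mpow qmat n) = _
    rw [ihn]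
    have h2 : fibZ (n + 1 + 1) = fibZ n + fibZ (n + 1) := fibZ_add_two n
    simp only [mmul, qmat, Mat2.mk.injEq]
    exact ⟨by omega, by omega, by omega, by omega⟩

theorem calc_py_alt_fib (n : Nat) : calc_py_alt (n : Int) = (fibZ n, fibZ (n + 1)) := by
  have h := calcLoop_spec n mone qmat
  rw [mone_mmul, mpow_qmat] at h
  exact h

-- ===== VERDICT (by name: the statement is the Claim_ definition above) =====
theorem calc_py_spec : Claim_equal_calc_py := by
  intro num _ hpre
  obtain ⟨n, rfl⟩ := Int.eq_ofNat_of_zero_le hpre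
  show calc_py (n : Int) = calc_py_alt (n : Int)
  rw [calc_py_fib, calc_py_alt_fib]
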